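-- pv_equiv track=rewrite | github.com/Jesus-Uces/Repos1-Prog_Jes-s-Carrillo | 13 Ejercicios/11.py | clasificar_edades
-- ===== SOURCE A (Python) =====
-- def clasificar_edades(edades):
--     menores = 0
--     adultos = 0
--     adultos_mayores = 0
--
--     for edad in edades:
--         if edad < 18:
--             menores += 1
--         elif edad >= 18 and edad < 60:
--             adultos += 1
--         else:
--             adultos_mayores += 1
--
--     return menores, adultos, adultos_mayores
-- ===== SOURCE B (Python) =====
-- def clasificar_edades(edades):
--     edades = list(edades)
--     menores = sum(1 for e in edades if e < 18)
--     adultos = sum(1 for e in edades if 18 <= e < 60)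
--     return menores, adultos, len(edades) - menores - adultos
-- ===== Notes on version B (the rewrite author's own statement) =====
-- stated objective: idiomatic
-- what changed: Replaces the single loop with three mutable counters by two filtered sum() comprehensions, deriving the third count as len - menores - adultos.
import Mathlib
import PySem

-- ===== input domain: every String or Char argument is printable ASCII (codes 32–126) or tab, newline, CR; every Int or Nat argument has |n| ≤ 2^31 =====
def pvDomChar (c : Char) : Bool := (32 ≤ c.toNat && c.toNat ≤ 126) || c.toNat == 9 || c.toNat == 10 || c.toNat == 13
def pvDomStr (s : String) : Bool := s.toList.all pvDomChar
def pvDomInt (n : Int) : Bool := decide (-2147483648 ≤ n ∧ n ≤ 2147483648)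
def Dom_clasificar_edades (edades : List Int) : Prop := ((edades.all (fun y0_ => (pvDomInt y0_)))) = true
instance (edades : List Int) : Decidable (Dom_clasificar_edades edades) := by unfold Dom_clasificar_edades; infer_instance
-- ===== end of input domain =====

-- ===== PORT A =====
def clasificar_edades (edades : List Int) : Int × Int × Int :=
  edades.foldl
    (fun (s : Int × Int × Int) edad =>
      if edad < 18 then (s.1 + 1, s.2.1, s.2.2)
      else if 18 ≤ edad ∧ edad < 60 then (s.1, s.2.1 + 1, s.2.2)
      else (s.1, s.2.1, s.2.2 + 1))
    (0, 0, 0)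

-- ===== PORT B =====
def clasificar_edades_alt (edades : List Int) : Int × Int × Int :=
  let menores : Int := ((edades.filter (fun e => e < 18)).map (fun _ => (1:Int))).sum
  let adultos : Int := ((edades.filter (fun e => 18 ≤ e ∧ e < 60)).map (fun _ => (1:Int))).sum
  (menores, adultos, (edades.length : Int) - menores - adultos)

-- ===== PRECONDITION & SPEC =====
def Spec_clasificar_edades (edades : List Int) (out : Int × Int × Int) : Prop := out = clasificar_edades_alt edades
instance (edades : List Int) (out : Int × Int × Int) : Decidable (Spec_clasificar_edades edades out) := by unfold Spec_clasificar_edades; infer_instance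

-- ===== CLAIM (what is proved, stated in full; the proofs are below) =====
def Claim_equal_clasificar_edades : Prop := ∀ (edades : List Int), Dom_clasificar_edades edades → Spec_clasificar_edades edades (clasificar_edades edades)

-- ===== LEMMAS AND PROOFS =====

-- ===== VERDICT (by name: the statement is the Claim_ definition above) =====
lemma clasificar_edades_fold (l : List Int) (a b c : Int) :
    l.foldl
      (fun (s : Int × Int × Int) edad =>
        if edad < 18 then (s.1 + 1, s.2.1, s.2.2)
        else if 18 ≤ edad ∧ edad < 60 then (s.1, s.2.1 + 1, s.2.2)
        else (s.1, s.2.1, s.2.2 + 1))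
      (a, b, c)
    = (a + ((l.filter (fun e => e < 18)).map (fun _ => (1:Int))).sum,
       b + ((l.filter (fun e => 18 ≤ e ∧ e < 60)).map (fun _ => (1:Int))).sum,
       c + ((l.length : Int)
            - ((l.filter (fun e => e < 18)).map (fun _ => (1:Int))).sum
            - ((l.filter (fun e => 18 ≤ e ∧ e < 60)).map (fun _ => (1:Int))).sum)) := by
  induction l generalizing a b c with
  | nil => simp
  | cons x xs ih =>
    simp only [List.foldl_cons, List.filter_cons, List.length_cons]
    by_cases h1 : x < 18
    · have h2 : ¬ (18 ≤ x ∧ x < 60) := by omega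
      simp only [h1, h2, ih, decide_true, decide_false, and_self, if_true, if_false,
        List.map_cons, List.sum_cons, Prod.mk.injEq]
      push_cast
      refine ⟨?_, ?_, ?_⟩ <;> first | trivial | ring
    · by_cases h2 : 18 ≤ x ∧ x < 60
      · simp only [h1, h2, h2.1, h2.2, ih, decide_true, decide_false, and_self, if_true,
          if_false, List.map_cons, List.sum_cons, Prod.mk.injEq]
        push_cast
        refine ⟨?_, ?_, ?_⟩ <;> first | trivial | ring
      · simp only [h1, h2, ih, decide_true, decide_false, if_true, if_false,
          List.map_cons, List.sum_cons, Prod.mk.injEq]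
        push_cast
        refine ⟨?_, ?_, ?_⟩ <;> first | trivial | ring

theorem clasificar_edades_spec : Claim_equal_clasificar_edades := by
  intro edades _
  unfold Spec_clasificar_edades clasificar_edades clasificar_edades_alt
  rw [clasificar_edades_fold]
  simp
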